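-- pv_equiv track=rewrite | github.com/yuyichao/srtctrl | lib/jsonstm.py | _j_to_num_end
-- ===== SOURCE A (Python) =====
-- _J_RES_BLK = -2
--
-- def _j_none_blk(jstr, start=0, char=None):
--     i = start
--     l = len(jstr)
--     while i < l:
--         if not jstr[i] in _j_blk_chars:
--             if not char is None and not jstr[i] in char:
--                 return
--             return i
--         i += 1
--     return _J_RES_BLK
--
-- _j_num_possible = '-0123456789.eE+'
--
-- def _j_to_num_end(jstr, start=0):
--     l = len(jstr)
--     i = _j_none_blk(jstr, start=start, char=_j_num_possible)
--     if i is None: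
--         return
--     if i == _J_RES_BLK:
--         return _J_RES_BLK
--     while i < l - 1:
--         i += 1
--         if not jstr[i] in _j_num_possible:
--             return i - 1
--     return i
--
-- _j_blk_chars = ' \t\n\r'
-- ===== SOURCE B (Python) =====
-- _J_RES_BLK = -2
-- _j_num_possible = '-0123456789.eE+'
-- _j_blk_chars = ' \t\n\r'
--
-- def _j_to_num_end(jstr, start=0):
--     tail = jstr[start:]
--     body = tail.lstrip(_j_blk_chars)
--     if not body:
--         return _J_RES_BLK
--     if body[0] not in _j_num_possible:
--         return None
--     first = start + (len(tail) - len(body))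
--     rest = body.lstrip(_j_num_possible)
--     return first + (len(body) - len(rest)) - 1
-- ===== Notes on version B (the rewrite author's own statement) =====
-- stated objective: idiomatic
-- what changed: Replaces the index-driven while loops (helper returning None/-2/index, then an increment loop with in-loop returns) by slicing plus two lstrip calls whose length differences give the first non-blank position and the length of the numeric run.
-- outside the precondition, e.g. on _j_to_num_end('1', -1): A returns 0, B returns -1; on _j_to_num_end('12', -2): A returns -2, B returns -1
import Mathlib
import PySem

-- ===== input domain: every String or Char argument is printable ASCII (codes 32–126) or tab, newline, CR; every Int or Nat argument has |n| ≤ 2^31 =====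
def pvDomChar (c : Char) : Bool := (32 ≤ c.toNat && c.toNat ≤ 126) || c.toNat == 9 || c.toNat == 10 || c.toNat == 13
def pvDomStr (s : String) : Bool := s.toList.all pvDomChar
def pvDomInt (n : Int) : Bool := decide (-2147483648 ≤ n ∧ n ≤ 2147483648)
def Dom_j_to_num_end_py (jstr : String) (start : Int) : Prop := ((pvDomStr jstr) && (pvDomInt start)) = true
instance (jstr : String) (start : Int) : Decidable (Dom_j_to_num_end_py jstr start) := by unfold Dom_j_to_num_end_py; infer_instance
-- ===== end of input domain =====

-- B replaces A's index-driven while loops by slicing plus two lstrip length-differences (idiomatic; return value only).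

def jBlkChars : List Char := " \t\n\r".toList          -- _j_blk_chars
def jNumPossible : List Char := "-0123456789.eE+".toList  -- _j_num_possible

-- ===== PORT A =====
-- the 'while i < l' loop of _j_none_blk; fuel = (l - i).toNat
def jNoneBlkLoop (s : List Char) (char : Option (List Char)) (i : Int) : Nat → Option Int
  | 0 => some (-2)                    -- loop exits: return _J_RES_BLK
  | fuel+1 =>
    match PySem.List.pyGet? s i with
    | none => some (-2)               -- IndexError (start < -len): excluded by Pre_
    | some c =>
      if c ∉ jBlkChars then
        match char with
        | some cs => if c ∉ cs then none else some i
        | none => some i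
      else jNoneBlkLoop s char (i + 1) fuel

def jNoneBlk (jstr : List Char) (start : Int) (char : Option (List Char)) : Option Int :=
  jNoneBlkLoop jstr char start ((jstr.length : Int) - start).toNat

-- the 'while i < l - 1' loop of _j_to_num_end; fuel = (l - 1 - i).toNat
def jToNumEndLoop (s : List Char) (i : Int) : Nat → Int
  | 0 => i                            -- loop exits: return i
  | fuel+1 =>
    let i' := i + 1
    match PySem.List.pyGet? s i' with
    | none => i' - 1                  -- IndexError: unreachable, i' stays below len inside the loop
    | some c => if c ∉ jNumPossible then i' - 1 else jToNumEndLoop s i' fuel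

def j_to_num_end_py (jstr : String) (start : Int) : Option Int :=
  let s := jstr.toList
  let l : Int := s.length
  match jNoneBlk s start (some jNumPossible) with
  | none => none
  | some i => if i = -2 then some (-2) else some (jToNumEndLoop s i (l - 1 - i).toNat)

-- ===== PORT B =====
-- str.lstrip(chars) is dropWhile (· ∈ chars) on the code points (exact: drops the longest leading run of chars from the set)
def j_to_num_end_py_alt (jstr : String) (start : Int) : Option Int :=
  let tail := PySem.List.slice jstr.toList (some start) none   -- jstr[start:]
  let body := tail.dropWhile (· ∈ jBlkChars)                   -- tail.lstrip(_j_blk_chars)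
  match body with
  | [] => some (-2)
  | c :: _ =>
    if c ∉ jNumPossible then none
    else
      let first : Int := start + ((tail.length : Int) - body.length)
      let rest := body.dropWhile (· ∈ jNumPossible)            -- body.lstrip(_j_num_possible)
      some (first + ((body.length : Int) - rest.length) - 1)

-- ===== PRECONDITION & SPEC =====
-- Pre_ excludes negative start, which is outside the function's natural domain of positions: there A relies on
-- Python's negative-index wraparound (returning e.g. 0 on ('1',-1), or -2 on ('12',-2) where the found index
-- collides with the _J_RES_BLK sentinel) and raises IndexError when start < -len(jstr).
def Pre_j_to_num_end_py (jstr : String) (start : Int) : Prop := 0 ≤ start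
instance (jstr : String) (start : Int) : Decidable (Pre_j_to_num_end_py jstr start) := by unfold Pre_j_to_num_end_py; infer_instance

def pvWitness_j_to_num_end_py : String × Int := (" -1.5e3,", 0)

def Spec_j_to_num_end_py (jstr : String) (start : Int) (out : Option Int) : Prop := out = j_to_num_end_py_alt jstr start
instance (jstr : String) (start : Int) (out : Option Int) : Decidable (Spec_j_to_num_end_py jstr start out) := by unfold Spec_j_to_num_end_py; infer_instance

-- ===== CLAIM (what is proved, stated in full; the proofs are below) =====
def Claim_equal_j_to_num_end_py : Prop := ∀ (jstr : String) (start : Int), Dom_j_to_num_end_py jstr start → Pre_j_to_num_end_py jstr start → Spec_j_to_num_end_py jstr start (j_to_num_end_py jstr start)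

-- ===== LEMMAS AND PROOFS =====

-- the value the blank-skipping loop computes, expressed over the suffix t = s.drop n
def blkSpec (n : Int) (t : List Char) : Option Int :=
  match t.dropWhile (· ∈ jBlkChars) with
  | [] => some (-2)
  | c :: _ => if c ∉ jNumPossible then none
              else some (n + ((t.length : Int) - (t.dropWhile (· ∈ jBlkChars)).length))

lemma blkSpec_cons (n : Int) (c : Char) (t : List Char) :
    blkSpec n (c :: t) =
      if c ∈ jBlkChars then blkSpec (n + 1) t
      else if c ∉ jNumPossible then none else some n := by
  by_cases hb : c ∈ jBlkChars
  · simp only [blkSpec, List.dropWhile_cons, hb, if_pos, decide_true]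
    cases hd : t.dropWhile (· ∈ jBlkChars) with
    | nil => simp
    | cons d t' =>
      have hlen : (t.dropWhile (· ∈ jBlkChars)).length ≤ t.length := List.length_dropWhile_le _ _
      rw [hd] at hlen
      by_cases hn : d ∈ jNumPossible <;> simp [hn]
      · omega
  · simp [blkSpec, hb]

lemma loop1_eq (t : List Char) : ∀ (s : List Char) (n : Nat), s.drop n = t →
    jNoneBlkLoop s (some jNumPossible) (n : Int) (((s.length : Int) - n).toNat) = blkSpec n t := by
  induction t with
  | nil =>
    intro s n h
    have hlen : s.length ≤ n := by
      have := List.drop_eq_nil_iff.mp h; omega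
    have : ((s.length : Int) - n).toNat = 0 := by omega
    rw [this]
    simp [jNoneBlkLoop, blkSpec]
  | cons c t ih =>
    intro s n h
    have hlt : n < s.length := by
      by_contra hge
      rw [List.drop_eq_nil_of_le (by omega)] at h
      simp at h
    have hget : s[n]? = some c := by
      have : (s.drop n)[0]? = some c := by rw [h]; rfl
      simpa [List.getElem?_drop] using this
    have hfuel : ((s.length : Int) - n).toNat = ((s.length : Int) - (n + 1)).toNat + 1 := by omega
    rw [hfuel]
    have hdrop : s.drop (n + 1) = t := by
      have : (s.drop n).tail = t := by rw [h]; rfl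
      rwa [List.tail_drop] at this
    rw [blkSpec_cons]
    by_cases hb : c ∈ jBlkChars
    · have := ih s (n + 1) hdrop
      simp only [jNoneBlkLoop, PySem.List.pyGet?_natCast, hget, hb, not_true_eq_false, if_false,
        if_pos]
      rw [show (n : Int) + 1 = ((n + 1 : Nat) : Int) by push_cast; ring]
      exact this
    · by_cases hn : c ∈ jNumPossible <;>
        simp [jNoneBlkLoop, PySem.List.pyGet?_natCast, hget, hb, hn]

lemma loop2_eq (t : List Char) : ∀ (s : List Char) (p : Nat), s.drop (p + 1) = t →
    jToNumEndLoop s (p : Int) (((s.length : Int) - 1 - p).toNat) =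
      (p : Int) + (t.takeWhile (· ∈ jNumPossible)).length := by
  induction t with
  | nil =>
    intro s p h
    have hlen : s.length ≤ p + 1 := by
      have := List.drop_eq_nil_iff.mp h; omega
    have : ((s.length : Int) - 1 - p).toNat = 0 := by omega
    rw [this]
    simp [jToNumEndLoop]
  | cons c t ih =>
    intro s p h
    have hlt : p + 1 < s.length := by
      by_contra hge
      rw [List.drop_eq_nil_of_le (by omega)] at h
      simp at h
    have hget : s[p + 1]? = some c := by
      have : (s.drop (p + 1))[0]? = some c := by rw [h]; rfl
      simpa [List.getElem?_drop] using this
    have hfuel : ((s.length : Int) - 1 - p).toNat = ((s.length : Int) - 1 - (p + 1)).toNat + 1 := by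
      omega
    rw [hfuel]
    have hdrop : s.drop (p + 1 + 1) = t := by
      have : (s.drop (p + 1)).tail = t := by rw [h]; rfl
      rwa [List.tail_drop] at this
    by_cases hn : c ∈ jNumPossible
    · have := ih s (p + 1) hdrop
      simp only [jToNumEndLoop, show (p : Int) + 1 = ((p + 1 : Nat) : Int) by push_cast; ring,
        PySem.List.pyGet?_natCast, hget, hn, not_true_eq_false, if_false]
      rw [this, List.takeWhile_cons_of_pos (by simpa using hn)]
      simp only [List.length_cons]; push_cast; omega
    · rw [jToNumEndLoop]
      simp only [show (p : Int) + 1 = ((p + 1 : Nat) : Int) by push_cast; ring,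
        PySem.List.pyGet?_natCast, hget]
      rw [List.takeWhile_cons_of_neg (by simp [hn])]
      simp [hn]

-- dropWhile is a drop by the length difference
lemma dropWhile_eq_drop (P : Char → Bool) (t : List Char) :
    t.dropWhile P = t.drop (t.length - (t.dropWhile P).length) := by
  induction t with
  | nil => simp
  | cons c t ih =>
    by_cases h : P c
    · have hlen : (t.dropWhile P).length ≤ t.length := List.length_dropWhile_le _ _
      rw [List.dropWhile_cons_of_pos h]
      have h2 : (c :: t).length - (t.dropWhile P).length = (t.length - (t.dropWhile P).length) + 1 := by
        simp only [List.length_cons]; omega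
      rw [h2, List.drop_succ_cons]; exact ih
    · simp [List.dropWhile_cons_of_neg h]

lemma takeWhile_len_eq (P : Char → Bool) (t : List Char) :
    ((t.takeWhile P).length : Int) = (t.length : Int) - (t.dropWhile P).length := by
  have := congrArg List.length (List.takeWhile_append_dropWhile (p := P) (l := t))
  simp only [List.length_append] at this
  omega

-- ===== VERDICT (by name: the statement is the Claim_ definition above) =====
theorem j_to_num_end_py_spec : Claim_equal_j_to_num_end_py := by
  intro jstr start _ hpre
  unfold Spec_j_to_num_end_py
  obtain ⟨n, rfl⟩ : ∃ n : Nat, start = (n : Int) := ⟨start.toNat, (Int.toNat_of_nonneg hpre).symm⟩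
  simp only [j_to_num_end_py, j_to_num_end_py_alt, PySem.List.slice_from_natCast]
  set s := jstr.toList with hs
  rw [show jNoneBlk s (n : Int) (some jNumPossible) = blkSpec n (s.drop n) from
    loop1_eq (s.drop n) s n rfl]
  set t := s.drop n with ht
  have hbodylen : (t.dropWhile (· ∈ jBlkChars)).length ≤ t.length := List.length_dropWhile_le _ _
  unfold blkSpec
  cases hbody : t.dropWhile (· ∈ jBlkChars) with
  | nil => simp
  | cons c body' =>
    rw [hbody] at hbodylen
    by_cases hn : c ∈ jNumPossible
    · simp only [hn, not_true_eq_false, if_false, List.length_cons]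
      push_cast
      set pI : Int := (n : Int) + ((t.length : Int) - ((body'.length : Int) + 1)) with hpI
      have htl : t.length = (List.drop n s).length := by rw [ht]
      have hbl : body'.length + 1 ≤ t.length := by
        simpa using hbodylen
      have hpd : pI = ((n + (t.length - (body'.length + 1)) : Nat) : Int) := by
        push_cast; omega
      set pN : Nat := n + (t.length - (body'.length + 1)) with hpN
      have hple : pI ≠ -2 := by omega
      have hdropP : s.drop pN = c :: body' := by
        have h1 : t.dropWhile (· ∈ jBlkChars) = t.drop (t.length - (c :: body').length) := by
          rw [dropWhile_eq_drop, hbody]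
        rw [hbody, ht, List.drop_drop] at h1
        rw [h1]
        congr 1
      have hdropP1 : s.drop (pN + 1) = body' := by
        have : (s.drop pN).tail = body' := by rw [hdropP]; rfl
        rwa [List.tail_drop] at this
      have h2 := loop2_eq body' s pN hdropP1
      rw [if_neg hple, hpd, h2]
      have hrest : (c :: body').dropWhile (· ∈ jNumPossible) = body'.dropWhile (· ∈ jNumPossible) :=
        List.dropWhile_cons_of_pos (by simpa using hn)
      rw [hrest]
      have := takeWhile_len_eq (· ∈ jNumPossible) body'
      congr 1
      omega
    · simp [hn]
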